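-- pv_equiv track=rewrite | github.com/gkekkis/SwissText | src/utils.py | clean_labels_from_multiple_o
-- ===== SOURCE A (Python) =====
-- from typing import Any, Dict, List, Tuple, Union
--
-- def clean_labels_from_multiple_o(labels: List[str]) -> List[str]:
--     """
--     Simplify label groups by collapsing sequences containing only 'O' labels
--     to a single 'O', otherwise picking the first non-'O' label in the group.
--
--     Args:
--     ----
--     labels (List[str]): List of label groups, each possibly containing multiple space-separated labels.
--
--     Returns:
--     -------
--     List[str]: Cleaned list of labels with multiple 'O's collapsed and first non-'O' label retained.
--
--     """  # noqa: D205
--     clean_labels = []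
--     for label in labels:
--         # If all labels in the group are 'O', simplify to single 'O'
--         if set(label.split()) == {"O"}:
--             clean_labels.append("O")
--         else:
--             # Otherwise, keep the first non-'O' label found
--             for item in label.split():
--                 if item != "O":
--                     clean_labels.append(item)
--                     break
--     return clean_labels
-- ===== SOURCE B (Python) =====
-- def clean_labels_from_multiple_o(labels):
--     # Single character-level pass per group: no split(), no set; tracks the
--     # first non-'O' word and whether any word was seen.
--     out = []
--     for label in labels:
--         found = None
--         seen_any = False
--         word = ""
--         for ch in label:
--             if ch.isspace():
--                 if word:
--                     seen_any = True
--                     if word != "O" and found is None: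
--                         found = word
--                     word = ""
--             else:
--                 word += ch
--         if word:
--             seen_any = True
--             if word != "O" and found is None:
--                 found = word
--         if found is not None:
--             out.append(found)
--         elif seen_any:
--             out.append("O")
--     return out
-- ===== Notes on version B (the rewrite author's own statement) =====
-- stated objective: alternative
-- what changed: Replaces A's per-group split()+set comparison plus separate rescan for the first non-'O' token with a single character-level state machine per group (first non-'O' word, any-word-seen flag) that never builds token lists or sets.
import Mathlib
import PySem

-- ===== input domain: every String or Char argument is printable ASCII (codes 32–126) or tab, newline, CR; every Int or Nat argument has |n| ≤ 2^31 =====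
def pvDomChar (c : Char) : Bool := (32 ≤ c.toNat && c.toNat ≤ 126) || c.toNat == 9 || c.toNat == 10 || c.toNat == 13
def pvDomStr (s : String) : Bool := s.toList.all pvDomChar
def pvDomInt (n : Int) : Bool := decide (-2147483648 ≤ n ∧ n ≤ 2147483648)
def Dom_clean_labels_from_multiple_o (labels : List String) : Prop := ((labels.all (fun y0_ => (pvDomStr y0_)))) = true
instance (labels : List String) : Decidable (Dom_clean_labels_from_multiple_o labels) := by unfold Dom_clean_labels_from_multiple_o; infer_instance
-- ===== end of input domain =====

-- B replaces A's split()+set comparison and separate rescan with a single character-level state machine per group (first non-'O' word, any-word-seen flag); objective: alternative.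


-- ===== PORT A =====
-- inner 'for item in label.split(): if item != "O": append; break'
def pvFirstNonO (acc : List String) : List String → List String
  | [] => acc
  | t :: rest => if t ≠ "O" then acc ++ [t] else pvFirstNonO acc rest

def clean_labels_from_multiple_o (labels : List String) : List String :=
  labels.foldl (fun acc label =>
    if PySem.Set.equal (PySem.Set.ofList (PySem.Str.split₀ label)) (PySem.Set.ofList ["O"]) then
      acc ++ ["O"]
    else
      pvFirstNonO acc (PySem.Str.split₀ label)) []

-- ===== PORT B =====
-- B's inner char loop plus the post-loop flush: state (found, seen_any, word);
-- returns (first non-'O' word if any, whether any word was seen)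
def pvScan : List Char → Option (List Char) → Bool → List Char → Option (List Char) × Bool
  | [], found, seen, word =>
      if word.isEmpty then (found, seen)
      else (if word ≠ ['O'] ∧ found = none then some word else found, true)
  | c :: rest, found, seen, word =>
      if PySem.Chars.isspace c then
        if word.isEmpty then pvScan rest found seen word
        else pvScan rest (if word ≠ ['O'] ∧ found = none then some word else found) true []
      else pvScan rest found seen (word ++ [c])

def clean_labels_from_multiple_o_alt (labels : List String) : List String :=
  labels.foldl (fun out label =>
    match pvScan label.toList none false [] with
    | (some w, _) => out ++ [String.ofList w]
    | (none, true) => out ++ ["O"]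
    | (none, false) => out) []

-- ===== PRECONDITION & SPEC =====
def Spec_clean_labels_from_multiple_o (labels : List String) (out : List String) : Prop := out = clean_labels_from_multiple_o_alt labels
instance (labels : List String) (out : List String) : Decidable (Spec_clean_labels_from_multiple_o labels out) := by unfold Spec_clean_labels_from_multiple_o; infer_instance

-- ===== CLAIM (what is proved, stated in full; the proofs are below) =====
def Claim_equal_clean_labels_from_multiple_o : Prop := ∀ (labels : List String), Dom_clean_labels_from_multiple_o labels → Spec_clean_labels_from_multiple_o labels (clean_labels_from_multiple_o labels)

-- ===== LEMMAS AND PROOFS =====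

-- the words still to be produced by split₀.go from chars cs with pending reversed word cur
def pvW : List Char → List Char → List (List Char)
  | [], cur => if cur.isEmpty then [] else [cur.reverse]
  | c :: rest, cur =>
      if PySem.Chars.isspace c then
        if cur.isEmpty then pvW rest [] else cur.reverse :: pvW rest []
      else pvW rest (c :: cur)

lemma pvGo_eq_W (cs : List Char) : ∀ cur acc,
    PySem.Chars.split₀.go cs cur acc = acc.reverse ++ pvW cs cur := by
  induction cs with
  | nil => intro cur acc; by_cases h : cur.isEmpty <;> simp [PySem.Chars.split₀.go, pvW, h]
  | cons c rest ih =>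
    intro cur acc
    by_cases hs : PySem.Chars.isspace c
    · by_cases h : cur.isEmpty <;> simp [PySem.Chars.split₀.go, pvW, hs, h, ih]
    · simp [PySem.Chars.split₀.go, pvW, hs, ih]

lemma pvSplit₀_eq_W (cs : List Char) : PySem.Chars.split₀ cs = pvW cs [] := by
  simp [PySem.Chars.split₀, pvGo_eq_W]

-- the first-non-'O' fold over a word list
def pvFF (found : Option (List Char)) (ws : List (List Char)) : Option (List Char) :=
  ws.foldl (fun f w => if w ≠ ['O'] ∧ f = none then some w else f) found

lemma pvFF_some (x : List Char) (ws : List (List Char)) : pvFF (some x) ws = some x := by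
  induction ws with
  | nil => rfl
  | cons w ws ih => simpa [pvFF] using ih

lemma pvFF_none (ws : List (List Char)) :
    pvFF none ws = ws.find? (fun w => w ≠ ['O']) := by
  induction ws with
  | nil => rfl
  | cons w ws ih =>
    by_cases h : w = ['O']
    · simpa [pvFF, List.find?, h] using ih
    · simp [pvFF, List.find?, h]
      exact pvFF_some w ws

-- B's scan computes the fold of pvFF over the remaining words, and whether any word exists
lemma pvScan_eq (cs : List Char) : ∀ found seen word,
    pvScan cs found seen word =
      (pvFF found (pvW cs word.reverse), seen || !(pvW cs word.reverse).isEmpty) := by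
  induction cs with
  | nil =>
    intro found seen word
    by_cases h : word.isEmpty
    · have : word = [] := List.isEmpty_iff.mp h
      subst this; simp [pvScan, pvW, pvFF]
    · have hne : word ≠ [] := fun hh => h (by simp [hh])
      have hrev : word.reverse.isEmpty = false := by simp [hne]
      simp [pvScan, h, pvW, hrev, pvFF]
  | cons c rest ih =>
    intro found seen word
    by_cases hs : PySem.Chars.isspace c
    · by_cases h : word.isEmpty
      · have : word = [] := List.isEmpty_iff.mp h
        subst this; simp [pvScan, pvW, hs, ih]
      · have hne : word ≠ [] := fun hh => h (by simp [hh])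
        have hrev : word.reverse.isEmpty = false := by simp [hne]
        simp [pvScan, h, pvW, hs, hrev, ih, pvFF, List.foldl_cons]
    · have : (word ++ [c]).reverse = c :: word.reverse := by simp
      simp [pvScan, hs, ih, this, pvW]

-- when the group has a non-'O' token, A's inner break-loop appends exactly the first one
lemma pvFirstNonO_eq (acc : List String) (toks : List String)
    (h : ∃ x ∈ toks, x ≠ "O") :
    pvFirstNonO acc toks = acc ++ [(toks.find? (fun x => x != "O")).getD "O"] := by
  induction toks with
  | nil => obtain ⟨x, hx, _⟩ := h; cases hx
  | cons t ts ih =>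
    by_cases ht : t = "O"
    · subst ht
      have : ∃ x ∈ ts, x ≠ "O" := by
        obtain ⟨x, hx, hne⟩ := h
        cases hx with
        | head => exact absurd rfl hne
        | tail _ hm => exact ⟨x, hm, hne⟩
      simpa [pvFirstNonO, List.find?] using ih this
    · have hb : (t != "O") = true := by simp [ht]
      simp [pvFirstNonO, ht, List.find?, hb]

-- the per-group step of A as one expression over its token list
lemma pvStepA_eq (acc : List String) (toks : List String) :
    (if PySem.Set.equal (PySem.Set.ofList toks) (PySem.Set.ofList ["O"]) then acc ++ ["O"]
     else pvFirstNonO acc toks)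
    = acc ++ (match toks with
              | [] => []
              | t :: ts => [((t :: ts).find? (fun x => x != "O")).getD "O"]) := by
  cases toks with
  | nil => simp [pvFirstNonO]
  | cons t ts =>
    by_cases hall : ∀ x ∈ t :: ts, x = "O"
    · have heq : PySem.Set.equal (PySem.Set.ofList (t :: ts)) (PySem.Set.ofList ["O"]) = true := by
        rw [PySem.Set.equal_iff]
        intro x
        simp only [PySem.Set.mem_ofList, List.mem_singleton]
        constructor
        · exact fun hx => hall x hx
        · intro hx; subst hx
          have := hall t (List.mem_cons_self)
          exact this ▸ List.mem_cons_self
      have hfind : (t :: ts).find? (fun x => x != "O") = none := by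
        rw [List.find?_eq_none]
        intro x hx
        simp [hall x hx]
      simp [heq, hfind]
    · have hall' : ∃ x ∈ t :: ts, x ≠ "O" := by
        by_contra hc
        exact hall fun x hx => by
          by_contra hne
          exact hc ⟨x, hx, hne⟩
      obtain ⟨x, hx, hne⟩ := hall'
      have heq : ¬ (PySem.Set.equal (PySem.Set.ofList (t :: ts)) (PySem.Set.ofList ["O"]) = true) := by
        rw [PySem.Set.equal_iff]
        intro hc
        have := (hc x).mp (by simpa [PySem.Set.mem_ofList] using hx)
        simp only [PySem.Set.mem_ofList, List.mem_singleton] at this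
        exact hne this
      simp only [heq, Bool.false_eq_true, if_false]
      exact pvFirstNonO_eq acc (t :: ts) ⟨x, hx, hne⟩

-- B's per-group contribution over the same word list
lemma pvStepB_eq (out : List String) (label : String) :
    (match pvScan label.toList none false [] with
      | (some w, _) => out ++ [String.ofList w]
      | (none, true) => out ++ ["O"]
      | (none, false) => out)
    = out ++ (match PySem.Str.split₀ label with
              | [] => []
              | t :: ts => [((t :: ts).find? (fun x => x != "O")).getD "O"]) := by
  have hscan := pvScan_eq label.toList none false []
  have hsplit : PySem.Str.split₀ label = (pvW label.toList []).map String.ofList := by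
    simp [PySem.Str.split₀, pvSplit₀_eq_W]
  rw [hscan]
  simp only [List.reverse_nil, pvFF_none, Bool.false_or]
  cases hW : pvW label.toList [] with
  | nil => simp [hsplit, hW]
  | cons w ws =>
    have hmapfind : ((w :: ws).map String.ofList).find? (fun x => x != "O")
        = ((w :: ws).find? (fun v => (String.ofList v != "O"))).map String.ofList := by
      simpa using (List.find?_map (f := String.ofList) (l := w :: ws)
        (p := fun x => x != "O"))
    have hpred : ∀ v : List Char, (String.ofList v != "O") = decide (v ≠ ['O']) := by
      intro v
      by_cases hv : v = ['O']
      · simp [hv]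
      · have : String.ofList v ≠ "O" := by
          intro hh
          apply hv
          have := congrArg String.toList hh
          simpa using this
        simp [this, hv]
    cases hf : (w :: ws).find? (fun v => decide (v ≠ ['O'])) with
    | none =>
      have : ((w :: ws).map String.ofList).find? (fun x => x != "O") = none := by
        rw [hmapfind]
        simp only [hpred]
        rw [hf]; rfl
      rw [List.map_cons] at this
      simp [hsplit, hW, hf, this]
    | some v =>
      have : ((w :: ws).map String.ofList).find? (fun x => x != "O") = some (String.ofList v) := by
        rw [hmapfind]
        simp only [hpred]
        rw [hf]; rfl
      rw [List.map_cons] at this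
      simp [hsplit, hW, hf, this]

lemma pvMain (labels : List String) : ∀ (acc : List String),
    labels.foldl (fun acc label =>
      if PySem.Set.equal (PySem.Set.ofList (PySem.Str.split₀ label)) (PySem.Set.ofList ["O"]) then
        acc ++ ["O"]
      else
        pvFirstNonO acc (PySem.Str.split₀ label)) acc
    = labels.foldl (fun out label =>
        match pvScan label.toList none false [] with
        | (some w, _) => out ++ [String.ofList w]
        | (none, true) => out ++ ["O"]
        | (none, false) => out) acc := by
  induction labels with
  | nil => intro acc; rfl
  | cons l ls ih =>
    intro acc
    simp only [List.foldl_cons]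
    rw [pvStepA_eq acc (PySem.Str.split₀ l), pvStepB_eq acc l, ih]

-- ===== VERDICT (by name: the statement is the Claim_ definition above) =====
theorem clean_labels_from_multiple_o_spec : Claim_equal_clean_labels_from_multiple_o := by
  intro labels _
  unfold Spec_clean_labels_from_multiple_o clean_labels_from_multiple_o clean_labels_from_multiple_o_alt
  exact pvMain labels []
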